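-- pv_equiv track=rewrite | github.com/ThFoolL/QuantitativeStrategy_Executionframework | exec_framework/protective_orders.py | _classify_validation_notes
-- ===== SOURCE A (Python) =====
-- def _classify_validation_notes(notes: list[str]) -> tuple[str, str, str | None, str]:
--     if not notes:
--         return 'OK', 'OK', None, 'OK'
--
--     if any(item.startswith('missing:') for item in notes):
--         return 'MISSING', 'MISSING', 'MISSING', 'protective_order_missing'
--
--     structural_prefixes = (
--         'unexpected:',
--         'status_invalid:',
--         'not_reduce_only:',
--     )
--     if any(item.startswith(prefix) for item in notes for prefix in structural_prefixes):
--         return 'MISMATCH', 'STRUCTURAL_MISMATCH', 'STRUCTURAL_MISMATCH', 'protective_order_mismatch'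
--
--     semantic_prefixes = (
--         'side_mismatch:',
--         'qty_mismatch:',
--         'price_mismatch:',
--     )
--     if any(item.startswith(prefix) for item in notes for prefix in semantic_prefixes):
--         return 'MISMATCH', 'SEMANTIC_MISMATCH', 'SEMANTIC_MISMATCH', 'protective_order_semantic_mismatch'
--
--     return 'MISMATCH', 'STRUCTURAL_MISMATCH', 'STRUCTURAL_MISMATCH', 'protective_order_mismatch'
-- ===== SOURCE B (Python) =====
-- def _classify_validation_notes(notes: list[str]) -> tuple[str, str, str | None, str]:
--     # Single pass: collect category flags once, then apply the priority cascade.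
--     has_missing = has_structural = has_semantic = False
--     for item in notes:
--         if item.startswith('missing:'):
--             has_missing = True
--         elif item.startswith(('unexpected:', 'status_invalid:', 'not_reduce_only:')):
--             has_structural = True
--         elif item.startswith(('side_mismatch:', 'qty_mismatch:', 'price_mismatch:')):
--             has_semantic = True
--     if not notes:
--         return 'OK', 'OK', None, 'OK'
--     if has_missing:
--         return 'MISSING', 'MISSING', 'MISSING', 'protective_order_missing'
--     if has_structural:
--         return 'MISMATCH', 'STRUCTURAL_MISMATCH', 'STRUCTURAL_MISMATCH', 'protective_order_mismatch'
--     if has_semantic: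
--         return 'MISMATCH', 'SEMANTIC_MISMATCH', 'SEMANTIC_MISMATCH', 'protective_order_semantic_mismatch'
--     return 'MISMATCH', 'STRUCTURAL_MISMATCH', 'STRUCTURAL_MISMATCH', 'protective_order_mismatch'
-- ===== Notes on version B (the rewrite author's own statement) =====
-- stated objective: faster
-- what changed: Replaces A's short-circuit cascade of independent any(...) scans (up to seven prefix scans over the list) with one classification pass that sets three booleans per item, followed by the same priority decision.
import Mathlib
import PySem

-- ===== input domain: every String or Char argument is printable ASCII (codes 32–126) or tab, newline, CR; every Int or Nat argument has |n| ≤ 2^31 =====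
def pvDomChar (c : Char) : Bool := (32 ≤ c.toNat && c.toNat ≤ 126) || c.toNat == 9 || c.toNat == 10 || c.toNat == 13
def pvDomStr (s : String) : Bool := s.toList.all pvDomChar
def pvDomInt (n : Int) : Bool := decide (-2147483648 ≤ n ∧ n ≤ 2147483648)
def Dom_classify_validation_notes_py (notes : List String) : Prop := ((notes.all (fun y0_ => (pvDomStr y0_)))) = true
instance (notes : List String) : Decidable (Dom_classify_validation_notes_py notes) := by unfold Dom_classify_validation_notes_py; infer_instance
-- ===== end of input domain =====

-- B replaces A's repeated any-scans with one classification pass plus the same priority decision (objective: faster, constant factor).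
-- ===== PORT A =====
def classify_validation_notes_py (notes : List String) : String × String × Option String × String :=
  if notes = [] then ("OK", "OK", none, "OK")
  else if notes.any (fun item => PySem.Str.startswith item "missing:") then
    ("MISSING", "MISSING", some "MISSING", "protective_order_missing")
  else if notes.any (fun item =>
      ["unexpected:", "status_invalid:", "not_reduce_only:"].any
        (fun p => PySem.Str.startswith item p)) then
    ("MISMATCH", "STRUCTURAL_MISMATCH", some "STRUCTURAL_MISMATCH", "protective_order_mismatch")
  else if notes.any (fun item =>
      ["side_mismatch:", "qty_mismatch:", "price_mismatch:"].any
        (fun p => PySem.Str.startswith item p)) then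
    ("MISMATCH", "SEMANTIC_MISMATCH", some "SEMANTIC_MISMATCH", "protective_order_semantic_mismatch")
  else ("MISMATCH", "STRUCTURAL_MISMATCH", some "STRUCTURAL_MISMATCH", "protective_order_mismatch")

-- ===== PORT B =====
def pvIsMissing (s : String) : Bool := PySem.Str.startswith s "missing:"

def pvIsStructural (s : String) : Bool :=
  ["unexpected:", "status_invalid:", "not_reduce_only:"].any (fun p => PySem.Str.startswith s p)

def pvIsSemantic (s : String) : Bool :=
  ["side_mismatch:", "qty_mismatch:", "price_mismatch:"].any (fun p => PySem.Str.startswith s p)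

def pvStep (acc : Bool × Bool × Bool) (item : String) : Bool × Bool × Bool :=
  if pvIsMissing item then (true, acc.2.1, acc.2.2)
  else if pvIsStructural item then (acc.1, true, acc.2.2)
  else if pvIsSemantic item then (acc.1, acc.2.1, true)
  else acc

def classify_validation_notes_py_alt (notes : List String) : String × String × Option String × String :=
  let fl := notes.foldl pvStep (false, false, false)
  if notes = [] then ("OK", "OK", none, "OK")
  else if fl.1 then ("MISSING", "MISSING", some "MISSING", "protective_order_missing")
  else if fl.2.1 then ("MISMATCH", "STRUCTURAL_MISMATCH", some "STRUCTURAL_MISMATCH", "protective_order_mismatch")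
  else if fl.2.2 then ("MISMATCH", "SEMANTIC_MISMATCH", some "SEMANTIC_MISMATCH", "protective_order_semantic_mismatch")
  else ("MISMATCH", "STRUCTURAL_MISMATCH", some "STRUCTURAL_MISMATCH", "protective_order_mismatch")

-- ===== PRECONDITION & SPEC =====
def Spec_classify_validation_notes_py (notes : List String) (out : String × String × Option String × String) : Prop := out = classify_validation_notes_py_alt notes
instance (notes : List String) (out : String × String × Option String × String) : Decidable (Spec_classify_validation_notes_py notes out) := by unfold Spec_classify_validation_notes_py; infer_instance

-- ===== CLAIM (what is proved, stated in full; the proofs are below) =====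
def Claim_equal_classify_validation_notes_py : Prop := ∀ (notes : List String), Dom_classify_validation_notes_py notes → Spec_classify_validation_notes_py notes (classify_validation_notes_py notes)

-- ===== LEMMAS AND  =====
lemma pvFoldl_flags (notes : List String) (a : Bool × Bool × Bool) :
    notes.foldl pvStep a =
      (a.1 || notes.any pvIsMissing,
       a.2.1 || notes.any (fun x => !pvIsMissing x && pvIsStructural x),
       a.2.2 || notes.any (fun x => !pvIsMissing x && (!pvIsStructural x && pvIsSemantic x))) := by
  induction notes generalizing a with
  | nil => simp
  | cons h t ih =>
    simp only [List.foldl_cons, List.any_cons, ih, pvStep]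
    split_ifs with h1 h2 h3 <;> simp_all

lemma pvAny_filter_not (p q : String → Bool) (notes : List String)
    (h : notes.any p = false) :
    notes.any (fun x => !p x && q x) = notes.any q := by
  induction notes with
  | nil => rfl
  | cons a t ih =>
    simp only [List.any_cons, Bool.or_eq_false_iff] at h
    simp [List.any_cons, h.1, ih h.2]

theorem classify_validation_notes_py_spec : Claim_equal_classify_validation_notes_py := by
  intro notes _
  unfold Spec_classify_validation_notes_py classify_validation_notes_py classify_validation_notes_py_alt
  have e1 : (fun item => PySem.Str.startswith item "missing:") = pvIsMissing := rfl
  have e2 : (fun item => ["unexpected:", "status_invalid:", "not_reduce_only:"].any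
      (fun p => PySem.Str.startswith item p)) = pvIsStructural := rfl
  have e3 : (fun item => ["side_mismatch:", "qty_mismatch:", "price_mismatch:"].any
      (fun p => PySem.Str.startswith item p)) = pvIsSemantic := rfl
  rw [e1, e2, e3, pvFoldl_flags]
  simp only [Bool.false_or]
  by_cases hm : notes.any pvIsMissing
  · simp [hm]
  · rw [Bool.not_eq_true] at hm
    rw [pvAny_filter_not pvIsMissing _ _ hm,
        pvAny_filter_not pvIsMissing (fun x => !pvIsStructural x && pvIsSemantic x) _ hm]
    by_cases hs : notes.any pvIsStructural
    · simp [hm, hs]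
    · rw [Bool.not_eq_true] at hs
      rw [pvAny_filter_not pvIsStructural pvIsSemantic _ hs]

-- ===== VERDICT (by name: the statement is the Claim_ definition above) =====
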